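-- pv_equiv track=rewrite | github.com/tchrys/Texas-Holdem-python-console- | hands.py | checkFlush
-- ===== SOURCE A (Python) =====
-- from itertools import combinations
--
-- def aceProblem(x):
--     if x == 1:
--         return 14
--     else:
--         return x
--
-- def getCardsNo(hand):
--     res = []
--     for (no, tp) in hand:
--         res.append(aceProblem(no))
--     return res
--
-- def sameColor(hand):
--     colorSet = set()
--     for (no, tp) in hand:
--         colorSet.add(tp)
--     return len(colorSet) == 1
--
-- def checkFlush(hand):
--     maximum = -1
--     comb = combinations(hand, 5)
--     for cmb in list(comb):
--         if (sameColor(cmb)):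
--             numbers = getCardsNo(hand)
--             maximum = max(numbers)
--     return maximum
-- ===== SOURCE B (Python) =====
-- def checkFlush(hand):
--     suits = [tp for _, tp in hand]
--     if any(suits.count(s) >= 5 for s in suits):
--         return max(14 if no == 1 else no for no, _ in hand)
--     return -1
-- ===== Notes on version B (the rewrite author's own statement) =====
-- stated objective: faster
-- what changed: Instead of enumerating all 5-card combinations and testing each for a single suit, B counts suit occurrences directly: a flush exists iff some suit appears at least 5 times, and then (as in A) the maximum is taken over the whole hand.
import Mathlib
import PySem

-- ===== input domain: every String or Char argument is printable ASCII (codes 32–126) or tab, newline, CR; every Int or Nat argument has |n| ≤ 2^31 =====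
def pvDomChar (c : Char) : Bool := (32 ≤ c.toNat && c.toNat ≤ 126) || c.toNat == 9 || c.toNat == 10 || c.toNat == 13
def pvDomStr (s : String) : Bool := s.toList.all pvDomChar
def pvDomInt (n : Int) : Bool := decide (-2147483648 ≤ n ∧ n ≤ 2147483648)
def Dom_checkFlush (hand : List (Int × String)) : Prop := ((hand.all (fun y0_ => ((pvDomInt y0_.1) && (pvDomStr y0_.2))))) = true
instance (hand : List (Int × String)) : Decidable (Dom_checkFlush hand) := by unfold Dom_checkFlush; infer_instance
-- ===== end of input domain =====

-- B replaces A's enumeration of all 5-card combinations by direct suit counting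
-- (a flush exists iff some suit occurs ≥ 5 times); measured asymptotically faster.


-- ===== PORT A =====
def aceProblem (x : Int) : Int := if x = 1 then 14 else x

def getCardsNo (hand : List (Int × String)) : List Int :=
  hand.foldl (fun res p => res ++ [aceProblem p.1]) []

def sameColor (hand : List (Int × String)) : Bool :=
  PySem.Set.len (hand.foldl (fun s p => PySem.Set.add s p.2) PySem.Set.empty) == 1

def checkFlush (hand : List (Int × String)) : Int :=
  (PySem.List.combinations hand 5).foldl
    (fun maximum cmb =>
      if sameColor cmb then
        match PySem.List.max? (getCardsNo hand) (fun y => y) with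
        | some m => m
        | none => maximum
      else maximum) (-1)

-- ===== PORT B =====
def checkFlush_alt (hand : List (Int × String)) : Int :=
  let suits := hand.map (fun p => p.2)
  if suits.any (fun s => decide (5 ≤ suits.count s)) then
    match PySem.List.max? (hand.map (fun p => if p.1 = 1 then 14 else p.1)) (fun y => y) with
    | some m => m
    | none => -1
  else -1

-- ===== PRECONDITION & SPEC =====
def Spec_checkFlush (hand : List (Int × String)) (out : Int) : Prop := out = checkFlush_alt hand
instance (hand : List (Int × String)) (out : Int) : Decidable (Spec_checkFlush hand out) := by unfold Spec_checkFlush; infer_instance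

-- ===== CLAIM (what is proved, stated in full; the proofs are below) =====
def Claim_equal_checkFlush : Prop := ∀ (hand : List (Int × String)), Dom_checkFlush hand → Spec_checkFlush hand (checkFlush hand)

-- ===== LEMMAS AND PROOFS =====

-- set(xs) has exactly one element iff xs is nonempty and constant
theorem ofList_length_one_iff {α : Type} [BEq α] [LawfulBEq α] (l : List α) :
    (PySem.Set.ofList l).length = 1 ↔ ∃ s, l ≠ [] ∧ ∀ x ∈ l, x = s := by
  constructor
  · intro h
    obtain ⟨s, hs⟩ := List.length_eq_one_iff.mp h
    refine ⟨s, ?_, ?_⟩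
    · intro hl; subst hl; simp [PySem.Set.ofList] at hs
    · intro x hx
      have : x ∈ PySem.Set.ofList l := (PySem.Set.mem_ofList _ _).mpr hx
      rw [hs] at this; simpa using this
  · rintro ⟨s, hne, hall⟩
    obtain ⟨a, t, rfl⟩ := List.exists_cons_of_ne_nil hne
    rw [PySem.Set.ofList_cons]
    have : PySem.Set.discard (PySem.Set.ofList t) a = [] := by
      apply List.eq_nil_iff_forall_not_mem.mpr
      intro y hy
      have := (PySem.Set.mem_discard _ _ _).mp hy
      have hy' : y = s := hall y (List.mem_cons_of_mem _ ((PySem.Set.mem_ofList _ _).mp this.1))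
      have ha' : a = s := hall a (by simp)
      exact this.2 (by rw [hy', ha'])
    simp [this]

theorem sameColor_eq (cmb : List (Int × String)) :
    sameColor cmb = ((PySem.Set.ofList (cmb.map (fun p => p.2))).length == 1) := by
  unfold sameColor
  rw [← PySem.Set.update_map_eq_foldl_add, PySem.Set.update_empty]
  simp [PySem.Set.len]

-- getCardsNo is the map of aceProblem over the card numbers
theorem getCardsNo_eq (hand : List (Int × String)) :
    getCardsNo hand = hand.map (fun p => if p.1 = 1 then 14 else p.1) := by
  unfold getCardsNo
  rw [PySem.List.foldl_append_singleton_eq_map]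
  simp [aceProblem]

-- core: a same-suit 5-combination exists iff some suit occurs at least 5 times
theorem any_flush_iff (hand : List (Int × String)) :
    ((PySem.List.combinations hand 5).any sameColor = true) ↔
    ((hand.map (fun p => p.2)).any (fun s => decide (5 ≤ (hand.map (fun p => p.2)).count s)) = true) := by
  rw [List.any_eq_true, List.any_eq_true]
  constructor
  · rintro ⟨cmb, hmem, hsc⟩
    obtain ⟨hsub, hlen⟩ := (PySem.List.mem_combinations_iff hand 5 cmb).mp hmem
    rw [sameColor_eq, beq_iff_eq, ofList_length_one_iff] at hsc
    obtain ⟨s, hne, hall⟩ := hsc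
    have hmapne : cmb ≠ [] := by intro h; subst h; exact hne rfl
    obtain ⟨c, hc⟩ := List.exists_mem_of_ne_nil cmb hmapne
    refine ⟨s, ?_, ?_⟩
    · have : c.2 = s := hall c.2 (List.mem_map_of_mem hc)
      rw [← this]
      exact List.mem_map_of_mem (hsub.mem hc)
    · simp only [decide_eq_true_eq]
      have hsubm : (cmb.map (fun p => p.2)).Sublist (hand.map (fun p => p.2)) :=
        hsub.map _
      have hcnt : (cmb.map (fun p => p.2)).count s = 5 := by
        rw [List.count_eq_length.mpr (by intro x hx; exact (hall x hx).symm)]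
        rw [List.length_map, hlen]
      calc (5 : Nat) = (cmb.map (fun p => p.2)).count s := hcnt.symm
        _ ≤ (hand.map (fun p => p.2)).count s := hsubm.count_le s
  · rintro ⟨s, hmem, hcnt⟩
    simp only [decide_eq_true_eq] at hcnt
    set cmb := (hand.filter (fun p => p.2 == s)).take 5 with hcmb
    have hflen : 5 ≤ (hand.filter (fun p => p.2 == s)).length := by
      rw [← List.countP_eq_length_filter]
      calc (5 : Nat) ≤ (hand.map (fun p => p.2)).count s := hcnt
        _ = hand.countP (fun p => p.2 == s) := by
            rw [List.count_eq_countP, List.countP_map]; rfl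
    have hlen : cmb.length = 5 := by
      rw [hcmb, List.length_take]; omega
    have hsub : cmb.Sublist hand :=
      ((List.take_sublist _ _).trans List.filter_sublist)
    have hallc : ∀ x ∈ cmb, x.2 = s := by
      intro x hx
      have := List.mem_of_mem_take hx
      have := List.of_mem_filter this
      simpa using this
    refine ⟨cmb, (PySem.List.mem_combinations_iff hand 5 cmb).mpr ⟨hsub, hlen⟩, ?_⟩
    rw [sameColor_eq, beq_iff_eq, ofList_length_one_iff]
    refine ⟨s, ?_, ?_⟩
    · intro h; rw [List.map_eq_nil_iff] at h; rw [h] at hlen; simp at hlen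
    · intro x hx
      obtain ⟨p, hp, rfl⟩ := List.mem_map.mp hx
      exact hallc p hp

-- the loop writes the constant m whenever the test fires
theorem foldl_if_const {α : Type} (L : List α) (p : α → Bool) (m : Int) (a : Int) :
    L.foldl (fun acc c => if p c then m else acc) a = if L.any p then m else a := by
  induction L generalizing a with
  | nil => rfl
  | cons c t ih =>
      simp only [List.foldl_cons, List.any_cons]
      by_cases hc : p c = true
      · simp only [hc, if_true, Bool.true_or, ih]
        split <;> rfl
      · simp only [Bool.not_eq_true] at hc
        simp [hc, ih]

-- if the test never fires the loop is the identity
theorem foldl_id_of_none {α : Type} (L : List α) (p : α → Bool) (g : Int → α → Int) (a : Int)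
    (h : ∀ c ∈ L, p c = false) :
    L.foldl (fun acc c => if p c then g acc c else acc) a = a := by
  induction L generalizing a with
  | nil => rfl
  | cons c t ih =>
      rw [List.foldl_cons, if_neg (by rw [h c List.mem_cons_self]; exact Bool.false_ne_true)]
      exact ih _ fun d hd => h d (List.mem_cons_of_mem _ hd)

-- ===== VERDICT (by name: the statement is the Claim_ definition above) =====
theorem checkFlush_spec : Claim_equal_checkFlush := by
  intro hand _
  unfold Spec_checkFlush checkFlush checkFlush_alt
  by_cases hany : (PySem.List.combinations hand 5).any sameColor = true
  · -- a flush exists: both sides return the max over the whole hand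
    have hany' := (any_flush_iff hand).mp hany
    -- hand is nonempty (it contains a 5-combination), so max? returns some
    obtain ⟨cmb, hmem, _⟩ := List.any_eq_true.mp hany
    obtain ⟨hsub, hlen⟩ := (PySem.List.mem_combinations_iff hand 5 cmb).mp hmem
    have hne : hand ≠ [] := by
      intro h
      have h5 := hsub.length_le
      rw [hlen, h] at h5
      simp at h5
    have hne' : getCardsNo hand ≠ [] := by
      rw [getCardsNo_eq]; simpa using hne
    have hsome : PySem.List.max? (getCardsNo hand) (fun y : Int => y) ≠ none :=
      fun h => hne' ((PySem.List.max?_eq_none_iff (getCardsNo hand) (fun y : Int => y)).mp h)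
    obtain ⟨m, hm⟩ := Option.ne_none_iff_exists'.mp hsome
    rw [hm]
    rw [foldl_if_const _ sameColor m (-1), if_pos hany]
    rw [if_pos hany']
    rw [getCardsNo_eq] at hm
    rw [hm]
  · -- no flush: both sides return -1
    have hall : ∀ c ∈ PySem.List.combinations hand 5, sameColor c = false := by
      intro c hc
      by_contra h
      exact hany (List.any_eq_true.mpr ⟨c, hc, by simpa using h⟩)
    rw [foldl_id_of_none _ sameColor
      (fun acc _ => match PySem.List.max? (getCardsNo hand) (fun y => y) with
        | some m => m
        | none => acc) (-1) hall]
    have : ¬ ((hand.map (fun p => p.2)).any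
        (fun s => decide (5 ≤ (hand.map (fun p => p.2)).count s)) = true) := by
      intro h; exact hany ((any_flush_iff hand).mpr h)
    rw [if_neg this]
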